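-- pv_equiv track=rewrite | github.com/YairLinHtet/Student_Attendance_DektopApp | Attendance.py | day_status
-- ===== SOURCE A (Python) =====
-- def day_status(day_list):
--     if all(v is None for v in day_list):
--         return "-"
--     if all(v==1 for v in day_list if v is not None):
--         return "P"
--     if all(v==0 for v in day_list if v is not None):
--         return "A"
--     return "Mix"
-- ===== SOURCE B (Python) =====
-- def day_status(day_list):
--     has_val = False
--     all_one = True
--     all_zero = True
--     for v in day_list:
--         if v is not None:
--             has_val = True
--             if v != 1:
--                 all_one = False
--             if v != 0:
--                 all_zero = False
--     if not has_val:
--         return "-"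
--     if all_one:
--         return "P"
--     if all_zero:
--         return "A"
--     return "Mix"
-- ===== Notes on version B (the rewrite author's own statement) =====
-- stated objective: alternative
-- what changed: Replaces A's three sequential all() generator scans with a single flag-accumulating pass (has_val/all_one/all_zero) that the final answer is read off.
import Mathlib
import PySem

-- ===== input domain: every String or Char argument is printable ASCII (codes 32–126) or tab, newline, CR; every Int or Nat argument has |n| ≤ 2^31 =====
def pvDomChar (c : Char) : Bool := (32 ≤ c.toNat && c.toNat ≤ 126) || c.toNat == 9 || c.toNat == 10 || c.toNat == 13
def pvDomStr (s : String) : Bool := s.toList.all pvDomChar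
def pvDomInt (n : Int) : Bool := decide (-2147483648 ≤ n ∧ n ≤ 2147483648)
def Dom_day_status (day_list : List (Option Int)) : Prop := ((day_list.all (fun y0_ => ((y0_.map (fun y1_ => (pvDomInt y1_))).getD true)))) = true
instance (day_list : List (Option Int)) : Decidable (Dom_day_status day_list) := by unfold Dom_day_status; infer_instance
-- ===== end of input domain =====

-- B replaces A's three sequential all() scans with one flag-accumulating pass (same O(n) cost, alternative decomposition).


-- ===== PORT A =====
-- port of A: three sequential all-scans in the same order as the Python
def day_status (day_list : List (Option Int)) : String :=
  if day_list.all (fun v => v.isNone) then "-"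
  else if day_list.all (fun v => match v with | none => true | some x => x == 1) then "P"
  else if day_list.all (fun v => match v with | none => true | some x => x == 0) then "A"
  else "Mix"

-- ===== PORT B =====
-- port of B: one fold accumulating (has_val, all_one, all_zero)
def day_status_alt (day_list : List (Option Int)) : String :=
  let st := day_list.foldl (fun (st : Bool × Bool × Bool) v =>
    match v with
    | none => st
    | some x => (true, st.2.1 && x == 1, st.2.2 && x == 0)) (false, true, true)
  if !st.1 then "-"
  else if st.2.1 then "P"
  else if st.2.2 then "A"
  else "Mix"

-- ===== PRECONDITION & SPEC =====
def Spec_day_status (day_list : List (Option Int)) (out : String) : Prop := out = day_status_alt day_list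
instance (day_list : List (Option Int)) (out : String) : Decidable (Spec_day_status day_list out) := by unfold Spec_day_status; infer_instance

-- ===== CLAIM (what is proved, stated in full; the proofs are below) =====
def Claim_equal_day_status : Prop := ∀ (day_list : List (Option Int)), Dom_day_status day_list → Spec_day_status day_list (day_status day_list)

-- ===== LEMMAS AND PROOFS =====

-- characterise B's fold by its three components
theorem fold_char (l : List (Option Int)) :
    l.foldl (fun (st : Bool × Bool × Bool) v =>
      match v with
      | none => st
      | some x => (true, st.2.1 && x == 1, st.2.2 && x == 0)) (false, true, true)
    = (l.any (fun v => v.isSome),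
       l.all (fun v => match v with | none => true | some x => x == 1),
       l.all (fun v => match v with | none => true | some x => x == 0)) := by
  suffices h : ∀ (a b c : Bool),
      l.foldl (fun (st : Bool × Bool × Bool) v =>
        match v with
        | none => st
        | some x => (true, st.2.1 && x == 1, st.2.2 && x == 0)) (a, b, c)
      = (a || l.any (fun v => v.isSome),
         b && l.all (fun v => match v with | none => true | some x => x == 1),
         c && l.all (fun v => match v with | none => true | some x => x == 0)) by
    simpa using h false true true
  induction l with
  | nil => simp
  | cons v t ih =>
    intro a b c
    cases v with
    | none => simpa using ih a b c
    | some x =>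
      simp only [List.foldl_cons, List.any_cons, List.all_cons, ih]
      simp [Bool.and_assoc]

-- ===== VERDICT (by name: the statement is the Claim_ definition above) =====
theorem day_status_spec : Claim_equal_day_status := by
  intro day_list _
  unfold Spec_day_status day_status day_status_alt
  rw [fold_char day_list]
  simp only [List.all_eq_true]
  by_cases hN : ∀ v ∈ day_list, v.isNone = true
  · have hany : (day_list.any fun v => v.isSome) = false := by
      simp only [List.any_eq_false]
      intro v hv
      simpa using hN v hv
    have hA : ∀ x ∈ day_list, (fun v : Option Int => v.isNone) x = true := hN
    rw [if_pos hA]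
    simp [hany]
  · push_neg at hN
    obtain ⟨v, hv, hvn⟩ := hN
    cases v with
    | none => simp at hvn
    | some x =>
      have hall : ¬ ∀ v ∈ day_list, v.isNone = true := fun h => by simpa using h _ hv
      rw [if_neg hall]
      have hhv : (day_list.any fun v => v.isSome) = true := by
        simp [List.any_eq_true]; exact ⟨some x, hv, rfl⟩
      simp [hhv]
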